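-- pv_equiv track=rewrite | github.com/kldgarrido/hopfield_network | utils.py | convert_vector_to_graph
-- ===== SOURCE A (Python) =====
-- def convert_vector_to_graph(clasified_pattern):
--     i=0
--     result = ""
--     for character in clasified_pattern[0]:
--         if i%5==0:
--             result+='\n'
--         if character == 1:
--             result += '0'
--         else:
--             result += '.'
--         i+=1
--     return result
-- ===== SOURCE B (Python) =====
-- def convert_vector_to_graph(clasified_pattern):
--     # pass 1: translate the pattern row to characters
--     s = ''.join('0' if c == 1 else '.' for c in clasified_pattern[0])
--     # pass 2: chunk into rows of 5, each prefixed with a newline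
--     result = ''
--     while s:
--         result += '\n' + s[:5]
--         s = s[5:]
--     return result
-- ===== Notes on version B (the rewrite author's own statement) =====
-- stated objective: alternative
-- what changed: A interleaves newline insertion into a single element loop with a counter i%5; B first translates the whole row to characters in one pass, then a second pass chunks that string into 5-character rows, prefixing each chunk with a newline.
import Mathlib
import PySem

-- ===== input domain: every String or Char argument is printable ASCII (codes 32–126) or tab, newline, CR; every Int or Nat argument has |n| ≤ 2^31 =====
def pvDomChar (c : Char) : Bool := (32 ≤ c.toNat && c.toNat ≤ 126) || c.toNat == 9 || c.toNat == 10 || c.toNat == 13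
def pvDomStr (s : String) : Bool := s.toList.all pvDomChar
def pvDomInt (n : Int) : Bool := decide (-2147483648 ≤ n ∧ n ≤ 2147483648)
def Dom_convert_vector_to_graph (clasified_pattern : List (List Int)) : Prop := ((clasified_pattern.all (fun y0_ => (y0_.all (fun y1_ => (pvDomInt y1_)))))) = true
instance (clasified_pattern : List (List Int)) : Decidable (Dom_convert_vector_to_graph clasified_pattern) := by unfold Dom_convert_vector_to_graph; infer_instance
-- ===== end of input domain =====

-- B separates translation (row → characters) from row-grouping (chunk into 5-char rows, each prefixed '\n'),
-- instead of A's single counter-driven loop; same cost, different decomposition. Return value only; no mutation.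


-- ===== PORT A =====
-- one step of A's for-loop: state (i, result)
def pvStepA (st : Int × List Char) (character : Int) : Int × List Char :=
  let res := if PySem.Int.mod st.1 5 == 0 then st.2 ++ ['\n'] else st.2
  let res := if character == 1 then res ++ ['0'] else res ++ ['.']
  (st.1 + 1, res)

def convert_vector_to_graph (clasified_pattern : List (List Int)) : String :=
  let row := (PySem.List.pyGet? clasified_pattern 0).getD []   -- clasified_pattern[0]; Pre_ excludes the IndexError case
  String.mk (row.foldl pvStepA (0, [])).2

-- ===== PORT B =====
-- Source B's while loop: result += '\n' + s[:5]; s = s[5:]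
def pvChunkGo (s : List Char) (result : List Char) : List Char :=
  if h : s = [] then result
  else pvChunkGo (PySem.List.slice s (some 5) none)
                 (result ++ '\n' :: PySem.List.slice s none (some 5))
termination_by s.length
decreasing_by
  simp only [PySem.List.slice]
  cases s with
  | nil => exact absurd rfl h
  | cons c cs => simp

def convert_vector_to_graph_alt (clasified_pattern : List (List Int)) : String :=
  let s := ((PySem.List.pyGet? clasified_pattern 0).getD []).map
             (fun c => if c == 1 then '0' else '.')
  String.mk (pvChunkGo s [])

-- ===== PRECONDITION & SPEC =====
-- Pre_ excludes exactly the empty outer list, on which A's clasified_pattern[0] raises IndexError.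
def Pre_convert_vector_to_graph (clasified_pattern : List (List Int)) : Prop := clasified_pattern ≠ []
instance (clasified_pattern : List (List Int)) : Decidable (Pre_convert_vector_to_graph clasified_pattern) := by unfold Pre_convert_vector_to_graph; infer_instance
def pvWitness_convert_vector_to_graph : List (List Int) := [[1, 1, -1, -1, 1, 1, 1]]
def Spec_convert_vector_to_graph (clasified_pattern : List (List Int)) (out : String) : Prop := out = convert_vector_to_graph_alt clasified_pattern
instance (clasified_pattern : List (List Int)) (out : String) : Decidable (Spec_convert_vector_to_graph clasified_pattern out) := by unfold Spec_convert_vector_to_graph; infer_instance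

-- ===== CLAIM (what is proved, stated in full; the proofs are below) =====
def Claim_equal_convert_vector_to_graph : Prop := ∀ (clasified_pattern : List (List Int)), Dom_convert_vector_to_graph clasified_pattern → Pre_convert_vector_to_graph clasified_pattern → Spec_convert_vector_to_graph clasified_pattern (convert_vector_to_graph clasified_pattern)

-- ===== LEMMAS AND PROOFS =====

def pvTr (c : Int) : Char := if c == 1 then '0' else '.'

theorem pvIfAppend (acc : List Char) (c : Int) :
    (if c = 1 then acc ++ ['0'] else acc ++ ['.']) = acc ++ [pvTr c] := by
  unfold pvTr; split_ifs <;> simp_all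

-- canonical chunked output: rows of 5, each prefixed with '\n'
def pvChunks (s : List Char) : List Char :=
  if s = [] then [] else '\n' :: s.take 5 ++ pvChunks (s.drop 5)
termination_by s.length
decreasing_by cases s with
  | nil => simp_all
  | cons c cs => simp

theorem pvChunkGo_eq (s : List Char) (result : List Char) :
    pvChunkGo s result = result ++ pvChunks s := by
  induction hn : s.length using Nat.strong_induction_on generalizing s result with
  | _ n ih =>
  by_cases hs : s = []
  · subst hs; simp [pvChunkGo, pvChunks]
  · rw [pvChunkGo, dif_neg hs, pvChunks, if_neg hs]
    have h5 : PySem.List.slice s (some 5) none = s.drop 5 := by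
      simpa using PySem.List.slice_from_natCast (xs := s) (a := 5)
    have h5' : PySem.List.slice s none (some 5) = s.take 5 := by
      simpa using PySem.List.slice_to_natCast (xs := s) (b := 5)
    have hlt : (s.drop 5).length < n := by
      subst hn
      cases s with
      | nil => exact absurd rfl hs
      | cons c cs => simp
    rw [h5, h5', ih (s.drop 5).length hlt _ _ rfl]
    simp

-- a run of A's loop whose counters never hit a multiple of 5 just appends translated characters
theorem pvRunA (cs : List Int) (i : Int) (acc : List Char)
    (hi : 0 ≤ i)
    (hnz : ∀ m : Nat, m < cs.length → (i + m) % 5 ≠ 0) :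
    cs.foldl pvStepA (i, acc) = (i + cs.length, acc ++ cs.map pvTr) := by
  induction cs generalizing i acc with
  | nil => simp
  | cons c cs ih =>
    have h0 : i % 5 ≠ 0 := by simpa using hnz 0 (by simp)
    have hm : PySem.Int.mod i 5 = i % 5 :=
      PySem.Int.mod_eq_emod_of_pos (a := i) (b := 5) (by norm_num)
    have hstep : pvStepA (i, acc) c = (i + 1, acc ++ [pvTr c]) := by
      simp [pvStepA, h0, pvIfAppend]
    rw [List.foldl_cons, hstep, ih (i + 1) _ (by omega) (by
      intro m hmlt
      have := hnz (m + 1) (by simpa using Nat.succ_lt_succ hmlt)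
      push_cast at this ⊢
      omega)]
    simp [Prod.ext_iff]
    omega

-- A's whole loop, started at a counter divisible by 5, produces the chunked translation
theorem pvMainA (cs : List Int) (i : Int) (acc : List Char)
    (hi : 0 ≤ i) (hmod : i % 5 = 0) :
    (cs.foldl pvStepA (i, acc)).2 = acc ++ pvChunks (cs.map pvTr) := by
  induction hn : cs.length using Nat.strong_induction_on generalizing cs i acc with
  | _ n ih =>
  cases cs with
  | nil => simp [pvChunks]
  | cons c cs =>
    have hm : PySem.Int.mod i 5 = i % 5 :=
      PySem.Int.mod_eq_emod_of_pos (a := i) (b := 5) (by norm_num)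
    have hstep : pvStepA (i, acc) c = (i + 1, (acc ++ ['\n']) ++ [pvTr c]) := by
      simp only [pvStepA, hm, hmod]
      split_ifs <;> simp_all [pvTr]
    have hrun : (cs.take 4).foldl pvStepA (i + 1, (acc ++ ['\n']) ++ [pvTr c])
        = (i + 1 + (cs.take 4).length, ((acc ++ ['\n']) ++ [pvTr c]) ++ (cs.take 4).map pvTr) := by
      apply pvRunA _ _ _ (by omega)
      intro m hmlt
      have hm4 : m < 4 := lt_of_lt_of_le hmlt (by simpa using List.length_take_le 4 cs)
      have he : (i + 1 + m) % 5 = (1 + m) % 5 := by omega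
      rw [he]; interval_cases m <;> decide
    have hchain : List.foldl pvStepA (i + 1, (acc ++ ['\n']) ++ [pvTr c]) cs
        = List.foldl pvStepA (i + 1, (acc ++ ['\n']) ++ [pvTr c]) (cs.take 4 ++ cs.drop 4) := by
      rw [List.take_append_drop]
    rw [List.foldl_cons, hstep, hchain, List.foldl_append, hrun]
    have ht : List.take 5 (List.map pvTr (c :: cs)) = pvTr c :: List.map pvTr (cs.take 4) := by
      simp [List.map_take]
    by_cases hlen : cs.length ≤ 4
    · have hdrop : cs.drop 4 = [] := List.drop_eq_nil_of_le hlen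
      have htk : cs.take 4 = cs := List.take_of_length_le hlen
      have hd : List.drop 5 (List.map pvTr (c :: cs)) = [] :=
        List.drop_eq_nil_of_le (by simp; omega)
      rw [hdrop, List.foldl_nil, pvChunks, if_neg (by simp), ht, hd, pvChunks]
      simp
    · push_neg at hlen
      have htlen : (cs.take 4).length = 4 := by rw [List.length_take]; omega
      have hlt : (cs.drop 4).length < n := by
        subst hn; rw [List.length_drop]; simp only [List.length_cons]; omega
      rw [ih _ hlt (cs.drop 4) _ _ (by rw [htlen]; omega) (by rw [htlen]; omega) rfl]
      have hd : List.drop 5 (List.map pvTr (c :: cs)) = List.map pvTr (cs.drop 4) := by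
        simp [List.map_drop]
      conv_rhs => rw [pvChunks]
      rw [if_neg (by simp), ht, hd]
      simp

-- ===== VERDICT (by name: the statement is the Claim_ definition above) =====
theorem convert_vector_to_graph_spec : Claim_equal_convert_vector_to_graph := by
  intro cp _ _
  show convert_vector_to_graph cp = convert_vector_to_graph_alt cp
  simp only [convert_vector_to_graph, convert_vector_to_graph_alt]
  rw [pvChunkGo_eq, pvMainA _ 0 [] (by norm_num) (by decide)]
  rfl
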